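-- pv_equiv track=rewrite | github.com/pypi-data/pypi-mirror-73 | packages/EcoNameTranslator/EcoNameTranslator-2.1-py3-none-any.whl/EcoNameTranslator/classify.py | runConsensusForSingleSpecies
-- ===== SOURCE A (Python) =====
-- import itertools
-- import operator
--
-- def runConsensusForSingleSpecies(nameAndResTuple):
--     finalMapping = {}
--     name,individualDictionaryMappings = nameAndResTuple
--     remove = set(['','no rank'])
--     ranks = list(set(itertools.chain(*list(map(lambda x: x.keys(),individualDictionaryMappings)))) - remove)
--     for taxaRank in ranks:
--         finalMapping[taxaRank] = runConsensusOnSingleTaxa(taxaRank,individualDictionaryMappings)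
--     return (name,finalMapping)
--
-- def runConsensusOnSingleTaxa(taxaRank,individualDictionaryMappings):
--     allItemsOfTaxa = []
--     for singleMapping in individualDictionaryMappings:
--         val = singleMapping.get(taxaRank,'')
--         if len(val) > 0: allItemsOfTaxa.append(val)
--
--     if len(allItemsOfTaxa) == 0: return ''
--     return mostCommonInList(allItemsOfTaxa)
--
-- def mostCommonInList(L):
--   SL = sorted((x, i) for i, x in enumerate(L))
--   groups = itertools.groupby(SL, key=operator.itemgetter(0))
--   def _auxfun(g):
--     item, iterable = g
--     count = 0
--     min_index = len(L)
--     for _, where in iterable: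
--       count += 1
--       min_index = min(min_index, where)
--     return count, -min_index
--   return max(groups, key=_auxfun)[0]
-- ===== SOURCE B (Python) =====
-- def runConsensusForSingleSpecies(nameAndResTuple):
--     name, individualDictionaryMappings = nameAndResTuple
--     skip = {'', 'no rank'}
--     # one pass: rank -> {value -> count}, ranks and values in first-occurrence order
--     counts = {}
--     for singleMapping in individualDictionaryMappings:
--         for rank, val in singleMapping.items():
--             if rank in skip:
--                 continue
--             c = counts.setdefault(rank, {})
--             if val:
--                 c[val] = c.get(val, 0) + 1
--     # selection pass: most common value per rank ('' when none); strict '>' keeps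
--     # the earliest-inserted value on ties, matching the earliest-first-occurrence rule
--     finalMapping = {}
--     for rank, c in counts.items():
--         best, bestn = '', 0
--         for val, n in c.items():
--             if n > bestn:
--                 best, bestn = val, n
--         finalMapping[rank] = best
--     return (name, finalMapping)
-- ===== Notes on version B (the rewrite author's own statement) =====
-- stated objective: faster
-- what changed: Instead of scanning all mappings (and sorting+groupby-ing the collected values) once per rank, B makes a single pass over all mappings building a dict rank -> {value -> count} (recording every qualifying rank), then a selection pass that takes each rank's most common value by a strict-greater fold, which preserves the earliest-first-occurrence tie-break.
import Mathlib
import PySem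

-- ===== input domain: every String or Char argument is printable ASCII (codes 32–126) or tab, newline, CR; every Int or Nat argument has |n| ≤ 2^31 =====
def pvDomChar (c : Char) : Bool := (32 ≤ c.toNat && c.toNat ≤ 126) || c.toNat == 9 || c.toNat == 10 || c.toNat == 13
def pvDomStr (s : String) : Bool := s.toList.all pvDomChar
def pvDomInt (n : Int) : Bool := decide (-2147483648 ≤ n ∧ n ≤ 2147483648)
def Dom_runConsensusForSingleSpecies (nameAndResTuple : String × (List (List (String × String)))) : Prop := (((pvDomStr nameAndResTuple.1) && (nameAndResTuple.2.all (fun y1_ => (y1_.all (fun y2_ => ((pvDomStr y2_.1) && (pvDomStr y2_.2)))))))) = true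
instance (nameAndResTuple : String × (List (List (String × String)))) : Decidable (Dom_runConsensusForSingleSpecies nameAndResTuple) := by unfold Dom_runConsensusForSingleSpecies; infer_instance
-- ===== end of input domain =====

-- B replaces A's per-rank scan of all mappings (plus a sort+groupby per rank) by one
-- counting pass over all mappings and a strict-greater selection pass (faster per the
-- timing run). Equivalence is about the return value; neither version mutates its input.

-- ===== PORT A =====

-- itertools.groupby over the sorted list (consecutive runs of equal first components)
def pvGroupsOf : List (String × Int) → List (String × List (String × Int))
  | [] => []
  | p :: rest =>
      match pvGroupsOf rest with
      | [] => [(p.1, [p])]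
      | (k, g) :: gs => if p.1 == k then (k, p :: g) :: gs else (p.1, [p]) :: (k, g) :: gs

-- Python tuple comparison (a, b) > (c, d) on ints
def pvLexGt (a b : Int × Int) : Bool := a.1 > b.1 || (a.1 == b.1 && a.2 > b.2)

-- _auxfun: (count, -min_index) over one group's (x, where) pairs
def pvAuxfun (g : String × List (String × Int)) (lenL : Int) : Int × Int :=
  let r := g.2.foldl (fun (acc : Int × Int) q => (acc.1 + 1, min acc.2 q.2)) (0, lenL)
  (r.1, -r.2)

-- Python max(iterable, key=…): first maximal element, strictly-greater key replaces
def pvPyMax {α : Type} (key : α → Int × Int) : List α → Option α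
  | [] => none
  | x :: xs => some (xs.foldl (fun b y => if pvLexGt (key y) (key b) then y else b) x)

def mostCommonInList (L : List String) : String :=
  let SL := PySem.List.sorted2 ((PySem.List.enumerate L).map (fun p => (p.2, p.1))) (fun q => q.1) (fun q => q.2)
  let groups := pvGroupsOf SL
  match pvPyMax (fun g => pvAuxfun g (L.length : Int)) groups with
  | some g => g.1
  | none => ""   -- unreachable: Python max on a non-empty iterable; guard only makes the port total

def runConsensusOnSingleTaxa (taxaRank : String) (individualDictionaryMappings : List (List (String × String))) : String :=
  let allItemsOfTaxa := individualDictionaryMappings.foldl (fun acc m =>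
      let val := (PySem.Dict.mk m).getD taxaRank ""
      if 0 < PySem.Str.len val then acc ++ [val] else acc) []
  if allItemsOfTaxa.length = 0 then "" else mostCommonInList allItemsOfTaxa

def runConsensusForSingleSpecies (nameAndResTuple : String × (List (List (String × String)))) : String × (List (String × String)) :=
  let name := nameAndResTuple.1
  let individualDictionaryMappings := nameAndResTuple.2
  let remove : PySem.Set String := PySem.Set.ofList ["", "no rank"]
  let ranks : List String :=
    PySem.Set.diff (PySem.Set.ofList (individualDictionaryMappings.flatMap (fun m => (PySem.Dict.mk m).keys))) remove
  let finalMapping := ranks.foldl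
      (fun (d : PySem.Dict String String) taxaRank => d.insert taxaRank (runConsensusOnSingleTaxa taxaRank individualDictionaryMappings))
      PySem.Dict.empty
  (name, finalMapping.items)

-- ===== PORT B =====

-- one counting pass (under Pre_ the inner association list IS the dict's items view)
def pvCountsB (mappings : List (List (String × String))) : PySem.Dict String (PySem.Dict String Int) :=
  let skip : PySem.Set String := PySem.Set.ofList ["", "no rank"]
  mappings.foldl (fun counts m =>
    m.foldl (fun counts (p : String × String) =>
      if skip.contains p.1 then counts
      else
        let c := counts.getD p.1 PySem.Dict.empty
        let c := if p.2 ≠ "" then c.insert p.2 ((c.getD p.2 0) + 1) else c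
        counts.insert p.1 c) counts) PySem.Dict.empty

-- selection pass: most common value ('' when the counter is empty), strict '>' keeps
-- the earliest-inserted value on ties
def pvBestB (c : PySem.Dict String Int) : String :=
  (c.items.foldl (fun (b : String × Int) vn => if vn.2 > b.2 then vn else b) ("", 0)).1

def runConsensusForSingleSpecies_alt (nameAndResTuple : String × (List (List (String × String)))) : String × (List (String × String)) :=
  let counts := pvCountsB nameAndResTuple.2
  let finalMapping := counts.items.foldl
      (fun (f : PySem.Dict String String) rc => f.insert rc.1 (pvBestB rc.2)) PySem.Dict.empty
  (nameAndResTuple.1, finalMapping.items)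

-- ===== PRECONDITION & SPEC =====
-- Pre_ only requires each inner association list to have pairwise-distinct keys: that is the
-- well-formedness of the dict encoding itself (a Python dict cannot hold a duplicate key),
-- so no input the Python function accepts is excluded.
def Pre_runConsensusForSingleSpecies (nameAndResTuple : String × (List (List (String × String)))) : Prop :=
  ∀ m ∈ nameAndResTuple.2, (m.map Prod.fst).Nodup
instance (nameAndResTuple : String × (List (List (String × String)))) : Decidable (Pre_runConsensusForSingleSpecies nameAndResTuple) := by unfold Pre_runConsensusForSingleSpecies; infer_instance

def pvWitness_runConsensusForSingleSpecies : (String × (List (List (String × String)))) :=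
  ("Canis lupus", [[("genus", "Canis"), ("species", "lupus"), ("no rank", "x")], [("genus", "Canis"), ("family", "")]])

def Spec_runConsensusForSingleSpecies (nameAndResTuple : String × (List (List (String × String)))) (out : String × (List (String × String))) : Prop := out = runConsensusForSingleSpecies_alt nameAndResTuple
instance (nameAndResTuple : String × (List (List (String × String)))) (out : String × (List (String × String))) : Decidable (Spec_runConsensusForSingleSpecies nameAndResTuple out) := by unfold Spec_runConsensusForSingleSpecies; infer_instance

-- ===== CLAIM (what is proved, stated in full; the proofs are below) =====
def Claim_equal_runConsensusForSingleSpecies : Prop := ∀ (nameAndResTuple : String × (List (List (String × String)))), Dom_runConsensusForSingleSpecies nameAndResTuple → Pre_runConsensusForSingleSpecies nameAndResTuple → Spec_runConsensusForSingleSpecies nameAndResTuple (runConsensusForSingleSpecies nameAndResTuple)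

-- ===== LEMMAS AND PROOFS =====

-- ---- proof-only helpers ----

-- lookup of one mapping (Python's singleMapping.get(taxaRank, ''))
def pvGet (m : List (String × String)) (r : String) : String := (PySem.Dict.mk m).getD r ""

-- the per-value counting step of B (body of the inner if in pvCountsB)
def pvVStep (c : PySem.Dict String Int) (v : String) : PySem.Dict String Int :=
  if v ≠ "" then c.insert v ((c.getD v 0) + 1) else c

-- the per-pair step of B once the skip test has been split off as a filter
def pvBStep (counts : PySem.Dict String (PySem.Dict String Int)) (p : String × String) :
    PySem.Dict String (PySem.Dict String Int) :=
  counts.insert p.1 (pvVStep (counts.getD p.1 PySem.Dict.empty) p.2)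

-- the comparison key both programs maximise: (count, -(index of first occurrence))
def pvPhi (L : List String) (x : String) : Int × Int := ((L.count x : Int), -(L.idxOf x : Int))

-- the rank list both programs produce (first occurrences, '' and 'no rank' removed)
def pvRanks (mappings : List (List (String × String))) : List String :=
  PySem.Set.ofList (((mappings.flatten).map Prod.fst).filter
    (fun x => !(PySem.Set.ofList ["", "no rank"] : PySem.Set String).contains x))

-- A's collected value list for one rank, in flatMap form
def pvItemsFor (mappings : List (List (String × String))) (r : String) : List String :=
  mappings.flatMap (fun m => if 0 < PySem.Str.len (pvGet m r) then [pvGet m r] else [])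

lemma pv_str_pos_iff (v : String) : (0 < PySem.Str.len v) ↔ v ≠ "" := by
  rw [PySem.Str.len_eq]
  constructor
  · intro h hv; subst hv; simp at h
  · intro h
    have : v.toList ≠ [] := by
      intro hnil; apply h; ext1; simp [hnil]
    cases hl : v.toList with
    | nil => exact absurd hl this
    | cons a t => simp

lemma pvLexGt_irrefl (a : Int × Int) : pvLexGt a a = false := by
  simp [pvLexGt]

lemma pvLexGt_notGt_trans {a b c : Int × Int} (h1 : pvLexGt a b = false)
    (h2 : pvLexGt b c = false) : pvLexGt a c = false := by
  obtain ⟨a1, a2⟩ := a; obtain ⟨b1, b2⟩ := b; obtain ⟨c1, c2⟩ := c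
  simp [pvLexGt] at *; omega

lemma pvLexGt_asym {a b : Int × Int} (h : pvLexGt a b = true) : pvLexGt b a = false := by
  obtain ⟨a1, a2⟩ := a; obtain ⟨b1, b2⟩ := b
  simp [pvLexGt] at *; omega

lemma pvMaxFold_spec {α : Type} (key : α → Int × Int) (l : List α) : ∀ (b : α),
    (l.foldl (fun b y => if pvLexGt (key y) (key b) then y else b) b ∈ b :: l) ∧
    (∀ y ∈ b :: l, pvLexGt (key y) (key (l.foldl (fun b y => if pvLexGt (key y) (key b) then y else b) b)) = false) := by
  induction l with
  | nil => intro b; simp [pvLexGt_irrefl]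
  | cons y tl ih =>
    intro b
    by_cases hgt : pvLexGt (key y) (key b) = true
    · have h := ih y
      simp only [List.foldl_cons, if_pos hgt]
      refine ⟨?_, ?_⟩
      · rcases List.mem_cons.1 h.1 with h1 | h1
        · rw [h1]; simp
        · simp [h1]
      · intro z hz
        rcases List.mem_cons.1 hz with h1 | hz'
        · rw [h1]
          exact pvLexGt_notGt_trans (pvLexGt_asym hgt) (h.2 y List.mem_cons_self)
        · rcases List.mem_cons.1 hz' with h2 | hz''
          · rw [h2]; exact h.2 y List.mem_cons_self
          · exact h.2 z (List.mem_cons_of_mem _ hz'')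
    · have hgt' : pvLexGt (key y) (key b) = false := by
        simpa using hgt
      have hb := ih b
      simp only [List.foldl_cons, if_neg hgt]
      refine ⟨?_, ?_⟩
      · rcases List.mem_cons.1 hb.1 with h1 | h1
        · rw [h1]; simp
        · simp [h1]
      · intro z hz
        rcases List.mem_cons.1 hz with h1 | hz'
        · rw [h1]; exact hb.2 b List.mem_cons_self
        · rcases List.mem_cons.1 hz' with h2 | hz''
          · rw [h2]
            exact pvLexGt_notGt_trans hgt' (hb.2 b List.mem_cons_self)
          · exact hb.2 z (List.mem_cons_of_mem _ hz'')

lemma pvBFold_spec (l : List (String × Int)) : ∀ (b : String × Int),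
    (l.foldl (fun b p => if p.2 > b.2 then p else b) b = b ∧ ∀ p ∈ l, p.2 ≤ b.2)
    ∨ ∃ l₁ p l₂, l = l₁ ++ p :: l₂ ∧ l.foldl (fun b p => if p.2 > b.2 then p else b) b = p ∧
        (∀ q ∈ l₁, q.2 < p.2) ∧ b.2 < p.2 ∧ (∀ q ∈ l₂, q.2 ≤ p.2) := by
  induction l with
  | nil => intro b; left; simp
  | cons q tl ih =>
    intro b
    by_cases hq : q.2 > b.2
    · right
      simp only [List.foldl_cons, if_pos hq]
      rcases ih q with ⟨h1, h2⟩ | ⟨l₁, p, l₂, heq, hres, hlt, hbp, hle⟩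
      · exact ⟨[], q, tl, by simp, h1, by simp, hq, h2⟩
      · exact ⟨q :: l₁, p, l₂, by simp [heq], hres,
          by intro z hz; rcases List.mem_cons.1 hz with rfl | hz'; exact hbp; exact hlt z hz',
          lt_trans hq hbp, hle⟩
    · rw [not_lt] at hq
      simp only [List.foldl_cons, if_neg (by omega : ¬ q.2 > b.2)]
      rcases ih b with ⟨h1, h2⟩ | ⟨l₁, p, l₂, heq, hres, hlt, hbp, hle⟩
      · left
        exact ⟨h1, by intro z hz; rcases List.mem_cons.1 hz with rfl | hz'; exact hq; exact h2 z hz'⟩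
      · right
        exact ⟨q :: l₁, p, l₂, by simp [heq], hres,
          by intro z hz; rcases List.mem_cons.1 hz with rfl | hz'; exact lt_of_le_of_lt hq hbp; exact hlt z hz',
          hbp, hle⟩

lemma pv_add_eq (s : List String) (x : String) :
    PySem.Set.add s x = if x ∈ s then s else s ++ [x] := by
  simp [PySem.Set.add, PySem.Set.contains]

lemma pv_ofList_cons (x : String) (xs : List String) :
    PySem.Set.ofList (x :: xs) = x :: (PySem.Set.ofList xs).filter (fun y => !(y == x)) := by
  induction xs using List.reverseRecOn with
  | nil => simp [PySem.Set.ofList, PySem.Set.empty, PySem.Set.add, PySem.Set.contains]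
  | append_singleton xs y ih =>
    have h1 : PySem.Set.ofList (x :: (xs ++ [y])) = PySem.Set.add (PySem.Set.ofList (x :: xs)) y := by
      simp [PySem.Set.ofList, List.foldl_append]
    have h2 : PySem.Set.ofList (xs ++ [y]) = PySem.Set.add (PySem.Set.ofList xs) y := by
      simp [PySem.Set.ofList, List.foldl_append]
    rw [h1, ih, h2]
    by_cases hxy : y = x
    · subst hxy
      rw [pv_add_eq, pv_add_eq]
      by_cases hy : y ∈ PySem.Set.ofList xs
      · simp [hy]
      · simp [hy, List.filter_append]
    · rw [pv_add_eq, pv_add_eq]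
      have hmemiff : y ∈ (PySem.Set.ofList xs).filter (fun z => !(z == x)) ↔ y ∈ PySem.Set.ofList xs := by
        simp [List.mem_filter, hxy]
      by_cases hy : y ∈ PySem.Set.ofList xs
      · simp [hy, hmemiff.2 hy, List.mem_cons, hxy]
      · have : ¬ (y = x ∨ y ∈ (PySem.Set.ofList xs).filter (fun z => !(z == x))) := by
          simp [hxy, hmemiff, hy]
        simp only [List.mem_cons, if_neg this, if_neg hy]
        simp [List.filter_append, hxy]

lemma pv_pairwise_idxOf (L : List String) :
    (PySem.Set.ofList L : List String).Pairwise (fun a b => L.idxOf a < L.idxOf b) := by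
  induction L with
  | nil => simp [PySem.Set.ofList, PySem.Set.empty]
  | cons x xs ih =>
    rw [pv_ofList_cons]
    constructor
    · intro y hy
      have hyx : y ≠ x := by
        have := (List.mem_filter.1 hy).2; simpa using this
      rw [List.idxOf_cons_self, List.idxOf_cons_ne _ hyx.symm]
      omega
    · have hsub := List.Pairwise.filter (p := fun y => !(y == x)) ih
      apply hsub.imp_of_mem
      intro a b ha hb hab
      have hax : a ≠ x := by have := (List.mem_filter.1 ha).2; simpa using this
      have hbx : b ≠ x := by have := (List.mem_filter.1 hb).2; simpa using this
      rw [List.idxOf_cons_ne _ hax.symm, List.idxOf_cons_ne _ hbx.symm]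
      omega

lemma pv_ofList_filter (q : String → Bool) (xs : List String) :
    PySem.Set.ofList (xs.filter q) = (PySem.Set.ofList xs : List String).filter q := by
  suffices h : ∀ s : List String, (xs.filter q).foldl PySem.Set.add (s.filter q) = (xs.foldl PySem.Set.add s).filter q by
    simpa [PySem.Set.ofList, PySem.Set.empty] using h []
  induction xs with
  | nil => intro s; simp
  | cons x xs ih =>
    intro s
    by_cases hqx : q x = true
    · have hstep : PySem.Set.add (s.filter q) x = (PySem.Set.add s x).filter q := by
        rw [pv_add_eq, pv_add_eq]
        by_cases hx : x ∈ s
        · simp [hx, List.mem_filter, hqx]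
        · have : x ∉ s.filter q := fun hc => hx (List.mem_filter.1 hc).1
          simp [hx, this, List.filter_append, hqx]
    
      simp only [List.filter_cons, hqx, if_pos, List.foldl_cons]
      rw [hstep, ih (PySem.Set.add s x)]
    · have hqx' : q x = false := by simpa using hqx
      have hstep : (PySem.Set.add s x).filter q = s.filter q := by
        rw [pv_add_eq]
        by_cases hx : x ∈ s
        · simp [hx]
        · simp [hx, List.filter_append, hqx']
      simp only [List.filter_cons, hqx', Bool.false_eq_true, if_false, List.foldl_cons]
      rw [← hstep, ih (PySem.Set.add s x)]

lemma pv_insertBy_pairwise {α : Type} (before : α → α → Bool) (R : α → α → Prop)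
    (htrans : ∀ {a b c}, R a b → R b c → R a c)
    (hT : ∀ a b, before a b = true → R a b) (hF : ∀ a b, before a b = false → R b a)
    (x : α) (l : List α) (hl : l.Pairwise R) : (PySem.List.insertBy before x l).Pairwise R := by
  induction l with
  | nil => simp [PySem.List.insertBy]
  | cons y ys ih =>
    rw [List.pairwise_cons] at hl
    by_cases hb : before x y = true
    · show ((if before x y then x :: y :: ys else y :: PySem.List.insertBy before x ys) : List α).Pairwise R
      rw [if_pos hb]
      refine List.pairwise_cons.2 ⟨?_, List.pairwise_cons.2 hl⟩
      intro z hz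
      rcases List.mem_cons.1 hz with h1 | h1
      · exact h1 ▸ hT _ _ hb
      · exact htrans (hT _ _ hb) (hl.1 z h1)
    · have hb' : before x y = false := by simpa using hb
      show ((if before x y then x :: y :: ys else y :: PySem.List.insertBy before x ys) : List α).Pairwise R
      rw [if_neg hb]
      refine List.pairwise_cons.2 ⟨?_, ih hl.2⟩
      intro z hz
      rcases (PySem.List.mem_insertBy before x z ys).1 hz with h1 | h1
      · exact h1 ▸ hF _ _ hb'
      · exact hl.1 z h1

lemma pv_sorted2_pairwise_fst (xs : List (String × Int)) :
    (PySem.List.sorted2 xs (fun q => q.1) (fun q => q.2) false).Pairwise (fun a b => a.1 ≤ b.1) := by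
  rw [PySem.List.sorted2]
  simp only [if_neg (by simp : ¬ (false = true))]
  generalize hacc : ([] : List (String × Int)) = acc
  have hacc' : acc.Pairwise (fun a b : String × Int => a.1 ≤ b.1) := by rw [← hacc]; simp
  clear hacc
  induction xs generalizing acc with
  | nil => simpa using hacc'
  | cons x xs ih =>
    simp only [List.foldl_cons]
    apply ih
    refine pv_insertBy_pairwise _ (fun (a b : String × Int) => a.1 ≤ b.1)
      (fun {a b c} h1 h2 => le_trans h1 h2) ?_ ?_ x acc hacc'
    · intro a b h
      simp only [Bool.or_eq_true, decide_eq_true_eq, Bool.and_eq_true, Bool.not_eq_true',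
        decide_eq_false_iff_not] at h
      rcases h with h | ⟨h, _⟩
      · exact le_of_lt h
      · exact le_of_not_gt h
    · intro a b h
      simp only [Bool.or_eq_false_iff, decide_eq_false_iff_not, Bool.and_eq_false_iff] at h
      exact le_of_not_gt h.1

lemma pv_groupsOf_cons (p : String × Int) (rest : List (String × Int)) :
    ∃ g gs, pvGroupsOf (p :: rest) = (p.1, g) :: gs := by
  cases hg : pvGroupsOf rest with
  | nil => exact ⟨[p], [], by simp [pvGroupsOf, hg]⟩
  | cons kg gs =>
    obtain ⟨k, g⟩ := kg
    by_cases hk : p.1 == k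
    · refine ⟨p :: g, gs, ?_⟩
      have : k = p.1 := (eq_of_beq hk).symm
      simp [pvGroupsOf, hg, this]
    · exact ⟨[p], (k, g) :: gs, by simp [pvGroupsOf, hg, hk]⟩

lemma pv_groupsOf_keys (SL : List (String × Int)) : ∀ (x : String),
    x ∈ (pvGroupsOf SL).map Prod.fst ↔ x ∈ SL.map Prod.fst := by
  induction SL with
  | nil => simp [pvGroupsOf]
  | cons p rest ih =>
    intro x
    cases hg : pvGroupsOf rest with
    | nil =>
      have : rest.map Prod.fst = [] := by
        cases rest with
        | nil => rfl
        | cons q r => obtain ⟨g, gs, h⟩ := pv_groupsOf_cons q r; rw [h] at hg; cases hg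
      simp [pvGroupsOf, hg, this]
    | cons kg gs =>
      obtain ⟨k, g⟩ := kg
      by_cases hk : p.1 == k
      · have hkp : k = p.1 := (eq_of_beq hk).symm
        have := ih x
        rw [hg] at this
        simp only [pvGroupsOf, hg, if_pos hk]
        simp only [List.map_cons, List.mem_cons] at this ⊢
        subst hkp
        tauto
      · have := ih x
        rw [hg] at this
        simp only [pvGroupsOf, hg, if_neg hk]
        simp only [List.map_cons, List.mem_cons] at this ⊢
        tauto

lemma pv_groupsOf_spec (SL : List (String × Int))
    (h : SL.Pairwise (fun a b => a.1 ≤ b.1)) :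
    (∀ g ∈ pvGroupsOf SL, g.2 = SL.filter (fun q => q.1 == g.1)) ∧
    ((pvGroupsOf SL).map Prod.fst).Pairwise (· < ·) := by
  induction SL with
  | nil => simp [pvGroupsOf]
  | cons p rest ih =>
    rw [List.pairwise_cons] at h
    obtain ⟨IH1, IH2⟩ := ih h.2
    cases hg : pvGroupsOf rest with
    | nil =>
      have hrest : rest = [] := by
        cases rest with
        | nil => rfl
        | cons q r => obtain ⟨g, gs, hx⟩ := pv_groupsOf_cons q r; rw [hx] at hg; cases hg
      subst hrest
      constructor
      · intro g hgm
        simp [pvGroupsOf] at hgm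
        subst hgm
        simp
      · simp [pvGroupsOf]
    | cons kg gs =>
      obtain ⟨k, g⟩ := kg
      have hkmem : k ∈ rest.map Prod.fst := by
        rw [← pv_groupsOf_keys, hg]; simp
      have hpk : p.1 ∈ rest.map Prod.fst → p.1 = k := by
        intro hp1
        cases rest with
        | nil => simp at hp1
        | cons r rest' =>
          have hk_eq : k = r.1 := by
            obtain ⟨g', gs', hx⟩ := pv_groupsOf_cons r rest'
            rw [hx] at hg
            injection hg with h1 _
            exact (congrArg Prod.fst h1).symm
          rcases List.mem_map.1 hp1 with ⟨q', hq', hfst⟩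
          rcases List.mem_cons.1 hq' with h1 | h1
          · rw [hk_eq, ← h1, hfst]
          · have h2 : r.1 ≤ q'.1 := (List.pairwise_cons.1 h.2).1 q' h1
            have h3 : p.1 ≤ r.1 := h.1 r List.mem_cons_self
            rw [hk_eq]
            exact le_antisymm h3 (hfst ▸ h2)
      rw [hg] at IH1 IH2
      by_cases hbeq : (p.1 == k) = true
      · have hpkeq : p.1 = k := eq_of_beq hbeq
        constructor
        · intro g' hg'
          simp only [pvGroupsOf, hg, if_pos hbeq] at hg'
          rcases List.mem_cons.1 hg' with h1 | h1
          · subst h1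
            have hcontent := IH1 (k, g) List.mem_cons_self
            simp only at hcontent ⊢
            simp only [List.filter_cons, hbeq, if_pos]
            rw [← hcontent]
          · have hklt : k < g'.1 := by
              rcases List.pairwise_cons.1 IH2 with ⟨hlt, _⟩
              exact hlt g'.1 (List.mem_map.2 ⟨g', h1, rfl⟩)
            have hne : (p.1 == g'.1) = false := by
              rw [hpkeq]; exact beq_eq_false_iff_ne.2 (ne_of_lt hklt)
            simp only [List.filter_cons, hne]
            exact IH1 g' (List.mem_cons_of_mem _ h1)
        · simp only [pvGroupsOf, hg, if_pos hbeq]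
          simpa using IH2
      · have hne : p.1 ≠ k := by simpa using hbeq
        have hnotmem : p.1 ∉ rest.map Prod.fst := fun hc => hne (hpk hc)
        constructor
        · intro g' hg'
          simp only [pvGroupsOf, hg, if_neg hbeq] at hg'
          rcases List.mem_cons.1 hg' with h1 | h1
          · subst h1
            simp only [List.filter_cons, show ((p.1 == p.1) = true) by simp]
            have : rest.filter (fun q => q.1 == p.1) = [] := by
              rw [List.filter_eq_nil_iff]
              intro q hq hc
              exact hnotmem (List.mem_map.2 ⟨q, hq, (eq_of_beq hc)⟩)
            rw [this]
            simp
          · have hkeys : g'.1 ∈ rest.map Prod.fst := by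
              rw [← pv_groupsOf_keys, hg]
              rcases List.mem_cons.1 h1 with h2 | h2
              · subst h2; simp
              · simp only [List.map_cons, List.mem_cons]
                right
                exact List.mem_map.2 ⟨g', h2, rfl⟩
            have hpne : (p.1 == g'.1) = false :=
              beq_eq_false_iff_ne.2 (fun hc => hnotmem (hc ▸ hkeys))
            simp only [List.filter_cons, hpne]
            exact IH1 g' h1
        · simp only [pvGroupsOf, hg, if_neg hbeq, List.map_cons]
          refine List.pairwise_cons.2 ⟨?_, ?_⟩
          swap
          · simpa using IH2
          intro κ hκ
          have hκ_rest : κ ∈ rest.map Prod.fst := by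
            rw [← pv_groupsOf_keys, hg]; simpa using hκ
          rcases List.mem_map.1 hκ_rest with ⟨q', hq', hfst⟩
          have hle : p.1 ≤ κ := hfst ▸ h.1 q' hq'
          exact lt_of_le_of_ne hle (fun hc => hnotmem (hc ▸ hκ_rest))

lemma pv_auxFold (l : List (String × Int)) : ∀ (a m : Int),
    l.foldl (fun (acc : Int × Int) q => (acc.1 + 1, min acc.2 q.2)) (a, m)
      = (a + l.length, (l.map Prod.snd).foldl min m) := by
  induction l with
  | nil => intro a m; simp
  | cons q l ih =>
    intro a m
    simp only [List.foldl_cons, List.map_cons, ih]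
    simp only [Prod.mk.injEq, List.length_cons]
    refine ⟨by push_cast; omega, trivial⟩

lemma pv_foldl_min_const (l : List Int) (a : Int) (h : ∀ j ∈ l, a ≤ j) : l.foldl min a = a := by
  induction l with
  | nil => rfl
  | cons j l ih =>
    simp only [List.foldl_cons]
    rw [min_eq_left (h j List.mem_cons_self)]
    exact ih (fun j' hj' => h j' (List.mem_cons_of_mem _ hj'))

lemma pv_pairs_count (L : List String) (x : String) : ∀ (s : Int),
    ((((PySem.List.enumerate L s).map (fun p => (p.2, p.1))).filter (fun q => q.1 == x))).length
      = L.count x := by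
  induction L with
  | nil => intro s; simp [PySem.List.enumerate]
  | cons y L ih =>
    intro s
    rw [PySem.List.enumerate_cons]
    by_cases hy : y = x
    · subst hy
      simp only [List.map_cons, List.filter_cons]
      simp [ih (s+1)]
    · simp only [List.map_cons, List.filter_cons]
      simp [ih (s+1), hy, beq_eq_false_iff_ne.2 hy]

lemma pv_pairs_snd_bound (L : List String) (x : String) : ∀ (s : Int),
    ∀ j ∈ ((((PySem.List.enumerate L s).map (fun p => (p.2, p.1))).filter (fun q => q.1 == x))).map Prod.snd,
      s ≤ j := by
  intro s j hj
  rcases List.mem_map.1 hj with ⟨q, hq, hsnd⟩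
  have hq1 := (List.mem_filter.1 hq).1
  rcases List.mem_map.1 hq1 with ⟨p, hp, hswap⟩
  rcases (PySem.List.mem_enumerate_iff _ _ _).1 hp with ⟨k, hk, hpk⟩
  subst hpk
  rw [← hswap] at hsnd
  simp at hsnd
  omega

lemma pv_pairs_minIdx (L : List String) (x : String) : ∀ (s : Int), x ∈ L →
    (((((PySem.List.enumerate L s).map (fun p => (p.2, p.1))).filter (fun q => q.1 == x))).map Prod.snd).foldl min (s + L.length)
      = s + L.idxOf x := by
  induction L with
  | nil => intro s hx; simp at hx
  | cons y L ih =>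
    intro s hx
    rw [PySem.List.enumerate_cons]
    by_cases hy : y = x
    · subst hy
      simp only [List.map_cons, List.filter_cons, beq_self_eq_true, if_pos, List.idxOf_cons_self]
      simp only [List.foldl_cons]
      have h1 : min (s + ((y :: L).length : Int)) s = s := by
        simp; omega
      rw [h1]
      have h2 : ∀ j ∈ (((PySem.List.enumerate L (s+1)).map (fun p => (p.2, p.1))).filter (fun q => q.1 == y)).map Prod.snd, s ≤ j :=
        fun j hj => le_trans (by omega) (pv_pairs_snd_bound L y (s+1) j hj)
      rw [pv_foldl_min_const _ _ h2]
      simp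
    · have hxL : x ∈ L := by rcases List.mem_cons.1 hx with h | h; exact absurd h.symm hy; exact h
      simp only [List.map_cons, List.filter_cons, beq_eq_false_iff_ne.2 hy]
      simp only [Bool.false_eq_true, if_false]
      have := ih (s+1) hxL
      rw [List.idxOf_cons_ne _ hy]
      have hlen : s + ((y :: L).length : Int) = (s+1) + (L.length : Int) := by simp; omega
      rw [hlen, this]
      push_cast
      omega

lemma pv_A_char (L : List String) (hL : L ≠ []) :
    mostCommonInList L ∈ L ∧
    ∀ y ∈ L, pvLexGt (pvPhi L y) (pvPhi L (mostCommonInList L)) = false := by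
  have hperm : (PySem.List.sorted2 ((PySem.List.enumerate L).map (fun p => (p.2, p.1))) (fun q => q.1) (fun q => q.2)).Perm
      ((PySem.List.enumerate L).map (fun p => (p.2, p.1))) :=
    PySem.List.sorted2_perm _ _ _ _
  set pairs := ((PySem.List.enumerate L).map (fun p => (p.2, p.1))) with hpairs
  set SL := PySem.List.sorted2 pairs (fun q => q.1) (fun q => q.2) with hSLdef
  have hpw : SL.Pairwise (fun a b => a.1 ≤ b.1) := pv_sorted2_pairwise_fst pairs
  obtain ⟨hcontent, hkeyslt⟩ := pv_groupsOf_spec SL hpw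
  have hfstpairs : pairs.map Prod.fst = L := by
    rw [hpairs, List.map_map]
    have : (Prod.fst ∘ fun p : Int × String => (p.2, p.1)) = Prod.snd := rfl
    rw [this, PySem.List.map_snd_enumerate]
  have hmemSL : ∀ x, x ∈ SL.map Prod.fst ↔ x ∈ L := by
    intro x
    rw [← hfstpairs]
    exact (hperm.map Prod.fst).mem_iff
  -- aux of a group equals pvPhi of its key
  have haux : ∀ g ∈ pvGroupsOf SL, pvAuxfun g (L.length : Int) = pvPhi L g.1 := by
    intro g hg
    have hgL : g.1 ∈ L := by
      rw [← hmemSL]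
      exact (pv_groupsOf_keys SL g.1).1 (List.mem_map.2 ⟨g, hg, rfl⟩)
    have hc := hcontent g hg
    have hfperm : (SL.filter (fun q => q.1 == g.1)).Perm (pairs.filter (fun q => q.1 == g.1)) :=
      hperm.filter _
    have hlen : g.2.length = L.count g.1 := by
      rw [hc, hfperm.length_eq, hpairs]
      exact pv_pairs_count L g.1 0
    haveI : RightCommutative (min : Int → Int → Int) :=
      ⟨fun b a1 a2 => by rw [min_assoc, min_comm a1 a2, ← min_assoc]⟩
    have hmin : (g.2.map Prod.snd).foldl min (L.length : Int) = (L.idxOf g.1 : Int) := by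
      rw [hc]
      rw [(hfperm.map Prod.snd).foldl_eq (L.length : Int)]
      have := pv_pairs_minIdx L g.1 0 hgL
      rw [hpairs]
      simpa using this
    unfold pvAuxfun
    rw [pv_auxFold]
    simp only [pvPhi, hmin, Prod.mk.injEq]
    refine ⟨by rw [← hlen]; omega, by trivial⟩
  -- groups nonempty
  have hSLne : SL ≠ [] := by
    intro hnil
    have hpnil : pairs = [] := List.Perm.eq_nil (hnil ▸ hperm).symm
    rw [hpairs, List.map_eq_nil_iff] at hpnil
    cases L with
    | nil => exact hL rfl
    | cons a L' => rw [PySem.List.enumerate_cons] at hpnil; cases hpnil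
  obtain ⟨q, SL', hSLcons⟩ : ∃ q SL', SL = q :: SL' := by
    cases hSL : SL with
    | nil => exact absurd hSL hSLne
    | cons q SL' => exact ⟨q, SL', rfl⟩
  obtain ⟨g00, gtl, hgs⟩ : ∃ g0 gtl, pvGroupsOf SL = (q.1, g0) :: gtl := by
    rw [hSLcons]; exact pv_groupsOf_cons q SL'
  set g0 : String × List (String × Int) := (q.1, g00) with hg0
  set res := gtl.foldl (fun b y => if pvLexGt (pvAuxfun y (L.length : Int)) (pvAuxfun b (L.length : Int)) then y else b) g0 with hres
  have hmc : mostCommonInList L = res.1 := by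
    show (match pvPyMax (fun g => pvAuxfun g (L.length : Int)) (pvGroupsOf SL) with
          | some g => g.1 | none => "") = res.1
    rw [hgs]
    simp [pvPyMax, hres]
  obtain ⟨hresmem, hresmax⟩ := pvMaxFold_spec (fun g => pvAuxfun g (L.length : Int)) gtl g0
  have hresgroups : res ∈ pvGroupsOf SL := by rw [hgs]; exact hresmem
  constructor
  · rw [hmc, ← hmemSL]
    exact (pv_groupsOf_keys SL res.1).1 (List.mem_map.2 ⟨res, hresgroups, rfl⟩)
  · intro y hy
    have hySL : y ∈ (pvGroupsOf SL).map Prod.fst := (pv_groupsOf_keys SL y).2 ((hmemSL y).2 hy)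
    rcases List.mem_map.1 hySL with ⟨gy, hgy, hgyfst⟩
    have := hresmax gy (by rw [← hgs]; exact hgy)
    rw [hmc, ← hgyfst, ← haux gy hgy, ← haux res hresgroups]
    exact this

lemma pv_B_char (L : List String) (hL : L ≠ []) :
    pvBestB (PySem.Dict.counter L) ∈ L ∧
    ∀ y ∈ L, y ≠ pvBestB (PySem.Dict.counter L) →
      pvLexGt (pvPhi L (pvBestB (PySem.Dict.counter L))) (pvPhi L y) = true := by
  have hitems : (PySem.Dict.counter L).items
      = (PySem.Set.ofList L : List String).map (fun k => (k, (L.count k : Int))) :=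
    PySem.Dict.items_counter L
  set K := (PySem.Set.ofList L : List String).map (fun k => (k, (L.count k : Int))) with hK
  have hpwK : K.Pairwise (fun p q : String × Int => L.idxOf p.1 < L.idxOf q.1) := by
    rw [hK]
    exact List.Pairwise.map _ (fun a b h => by simpa using h) (pv_pairwise_idxOf L)
  have hKcnt : ∀ p ∈ K, p.2 = (L.count p.1 : Int) ∧ p.1 ∈ L := by
    intro p hp
    rcases List.mem_map.1 hp with ⟨k, hk, hpk⟩
    refine ⟨by rw [← hpk], by rw [← hpk]; exact (PySem.Set.mem_ofList L k).1 hk⟩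
  have hbest : pvBestB (PySem.Dict.counter L)
      = (K.foldl (fun (b : String × Int) vn => if vn.2 > b.2 then vn else b) ("", 0)).1 := by
    unfold pvBestB; rw [hitems]
  rcases pvBFold_spec K ("", 0) with ⟨hres, hall⟩ | ⟨l₁, p, l₂, heq, hres, hlt, hbp, hle⟩
  · -- impossible: L nonempty gives a positive count in K
    exfalso
    obtain ⟨a, ha⟩ : ∃ a, a ∈ L := by
      cases L with
      | nil => exact absurd rfl hL
      | cons a L' => exact ⟨a, List.mem_cons_self⟩
    have haK : (a, (L.count a : Int)) ∈ K :=
      List.mem_map.2 ⟨a, (PySem.Set.mem_ofList L a).2 ha, rfl⟩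
    have := hall _ haK
    have hcnt : 0 < L.count a := List.count_pos_iff.2 ha
    simp at this
    omega
  · have hpmem : p ∈ K := by rw [heq]; exact List.mem_append_right _ List.mem_cons_self
    obtain ⟨hp2, hp1L⟩ := hKcnt p hpmem
    have hbest' : pvBestB (PySem.Dict.counter L) = p.1 := by rw [hbest, hres]
    constructor
    · rw [hbest']; exact hp1L
    · intro y hy hne
      rw [hbest'] at hne ⊢
      have hyK : (y, (L.count y : Int)) ∈ K :=
        List.mem_map.2 ⟨y, (PySem.Set.mem_ofList L y).2 hy, rfl⟩
      rw [heq] at hyK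
      have hppw := (List.pairwise_append.1 (heq ▸ hpwK))
      rcases List.mem_append.1 hyK with h1 | h1
      · -- y in l₁: strictly smaller count
        have hcnt : ((y, (L.count y : Int)) : String × Int).2 < p.2 := hlt _ h1
        simp only at hcnt
        rw [hp2] at hcnt
        obtain ⟨x1, x2⟩ := p
        simp only [pvPhi, pvLexGt] at *
        simp
        omega
      · rcases List.mem_cons.1 h1 with h2 | h2
        · exfalso
          apply hne
          have := congrArg Prod.fst h2
          simpa using this
        · -- y in l₂: count ≤, but later first occurrence
          have hcnt : ((y, (L.count y : Int)) : String × Int).2 ≤ p.2 := hle _ h2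
          have hidx : L.idxOf p.1 < L.idxOf y := by
            have := (List.pairwise_cons.1 hppw.2.1).1 (y, (L.count y : Int)) h2
            simpa using this
          simp only at hcnt
          rw [hp2] at hcnt
          simp only [pvPhi, pvLexGt]
          simp
          omega

lemma pv_core (L : List String) : mostCommonInList L = pvBestB (PySem.Dict.counter L) := by
  by_cases hL : L = []
  · subst hL; rfl
  · by_contra hne
    obtain ⟨hmcL, hmcmax⟩ := pv_A_char L hL
    obtain ⟨hbbL, hbbstrict⟩ := pv_B_char L hL
    have h1 := hbbstrict (mostCommonInList L) hmcL (fun hc => hne hc)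
    have h2 := hmcmax (pvBestB (PySem.Dict.counter L)) hbbL
    rw [h1] at h2
    cases h2

lemma pv_getD_BStep_fold (qs : List (String × String)) :
    ∀ (d : PySem.Dict String (PySem.Dict String Int)) (r : String),
    ((qs.foldl pvBStep d).getD r PySem.Dict.empty)
      = ((qs.filter (fun p => p.1 == r)).map Prod.snd).foldl pvVStep (d.getD r PySem.Dict.empty) := by
  induction qs with
  | nil => intro d r; simp
  | cons p qs ih =>
    intro d r
    simp only [List.foldl_cons, List.filter_cons]
    by_cases hpr : p.1 = r
    · simp only [hpr, beq_self_eq_true, if_pos, List.map_cons, List.foldl_cons]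
      rw [ih]
      congr 1
      unfold pvBStep
      rw [hpr, PySem.Dict.getD_insert]
      simp
    · have : (p.1 == r) = false := beq_eq_false_iff_ne.2 hpr
      simp only [this, Bool.false_eq_true, if_false]
      rw [ih]
      congr 1
      unfold pvBStep
      rw [PySem.Dict.getD_insert]
      simp [Ne.symm hpr]

lemma pv_items_eq_keys_map {ν : Type} (l : List (String × ν)) (dflt : ν)
    (h : (l.map Prod.fst).Nodup) :
    l = (l.map Prod.fst).map (fun k => (k, (PySem.Dict.mk l).getD k dflt)) := by
  induction l with
  | nil => rfl
  | cons kv l ih =>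
    obtain ⟨k, v⟩ := kv
    simp only [List.map_cons, List.nodup_cons] at h
    have h1 : (PySem.Dict.mk ((k, v) :: l)).getD k dflt = v := by
      rw [PySem.Dict.getD, PySem.Dict.get?_mk_cons]; simp
    simp only [List.map_cons, h1]
    congr 1
    · have := ih h.2
      conv_lhs => rw [this]
      apply List.map_congr_left
      intro k' hk'
      have hne : (k == k') = false := beq_eq_false_iff_ne.2 (fun hc => h.1 (hc ▸ hk'))
      simp only [Prod.mk.injEq, true_and]
      conv_rhs => rw [PySem.Dict.getD, PySem.Dict.get?_mk_cons]
      rw [hne]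
      simp [PySem.Dict.getD]

lemma pv_foldl_insert_items {ν β : Type} (key : β → String) (F : β → ν) (l : List β) :
    ∀ (d : PySem.Dict String ν), (∀ x ∈ l, d.contains (key x) = false) → ((l.map key).Nodup) →
    (l.foldl (fun d x => d.insert (key x) (F x)) d).items = d.items ++ l.map (fun x => (key x, F x)) := by
  induction l with
  | nil => intro d _ _; simp
  | cons x l ih =>
    intro d hd hnd
    simp only [List.map_cons, List.nodup_cons] at hnd
    have hcx : d.contains (key x) = false := hd x List.mem_cons_self
    have hins : (d.insert (key x) (F x)).items = d.items ++ [(key x, F x)] := by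
      rw [PySem.Dict.insert, hcx]
      simp
    simp only [List.foldl_cons]
    rw [ih (d.insert (key x) (F x)) ?hcontains hnd.2, hins]
    · simp
    · intro y hy
      rw [PySem.Dict.contains]
      rw [hins]
      simp only [List.any_append, Bool.or_eq_false_iff]
      constructor
      · have := hd y (List.mem_cons_of_mem _ hy)
        rw [PySem.Dict.contains] at this
        exact this
      · simp only [List.any_cons, List.any_nil, Bool.or_false]
        exact beq_eq_false_iff_ne.2 (fun hc => hnd.1 (hc ▸ List.mem_map.2 ⟨y, hy, rfl⟩))

lemma pv_vstep_counter (vs : List String) :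
    vs.foldl pvVStep PySem.Dict.empty = PySem.Dict.counter (vs.filter (fun v => v != "")) := by
  rw [PySem.Dict.counter, List.foldl_filter]
  congr 1
  funext c v
  by_cases hv : v = ""
  · simp [pvVStep, hv]
  · simp [pvVStep, PySem.Dict.modify, hv]

lemma pv_mapping_bridge (m : List (String × String)) (r : String) (hm : (m.map Prod.fst).Nodup) :
    ((m.filter (fun p => p.1 == r)).map Prod.snd).filter (fun v => v != "")
      = if 0 < PySem.Str.len (pvGet m r) then [pvGet m r] else [] := by
  induction m with
  | nil =>
    have : pvGet [] r = "" := rfl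
    simp [pvGet, PySem.Dict.getD, PySem.Dict.get?]
  | cons kv m ih =>
    obtain ⟨k, v⟩ := kv
    simp only [List.map_cons, List.nodup_cons] at hm
    by_cases hkr : k = r
    · subst hkr
      have hget : pvGet ((k, v) :: m) k = v := by
        simp [pvGet, PySem.Dict.getD, PySem.Dict.get?_mk_cons]
      have hrest : m.filter (fun p => p.1 == k) = [] := by
        rw [List.filter_eq_nil_iff]
        intro q hq hc
        exact hm.1 (eq_of_beq hc ▸ List.mem_map.2 ⟨q, hq, rfl⟩)
      simp only [List.filter_cons, beq_self_eq_true, if_pos, hrest, List.map_cons, List.map_nil]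
      rw [hget]
      by_cases hv : v = ""
      · subst hv
        simp
      · simp only [List.filter_nil]
        rw [if_pos (by simpa using hv), if_pos ((pv_str_pos_iff v).2 hv)]
    · have hbe : (k == r) = false := beq_eq_false_iff_ne.2 hkr
      have hget : pvGet ((k, v) :: m) r = pvGet m r := by
        simp [pvGet, PySem.Dict.getD, PySem.Dict.get?_mk_cons, hbe]
      simp only [List.filter_cons, hbe, Bool.false_eq_true, if_false]
      rw [hget]
      exact ih hm.2

lemma pv_countsB_eq (mappings : List (List (String × String))) :
    pvCountsB mappings
      = ((mappings.flatten).filter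
          (fun p => !(PySem.Set.ofList ["", "no rank"] : PySem.Set String).contains p.1)).foldl
            pvBStep PySem.Dict.empty := by
  show mappings.foldl _ PySem.Dict.empty = _
  rw [← List.foldl_flatten, List.foldl_filter]
  congr 1
  funext counts p
  simp only [pvBStep, pvVStep]
  simp
  split_ifs <;> first | rfl | tauto

lemma pv_counts_keys (mappings : List (List (String × String))) :
    (pvCountsB mappings).keys = pvRanks mappings := by
  rw [pv_countsB_eq]
  have hfold : ((mappings.flatten).filter
          (fun p => !(PySem.Set.ofList ["", "no rank"] : PySem.Set String).contains p.1)).foldl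
            pvBStep PySem.Dict.empty
      = ((mappings.flatten).filter
          (fun p => !(PySem.Set.ofList ["", "no rank"] : PySem.Set String).contains p.1)).foldl
          (fun d x => d.insert x.1 ((fun (d : PySem.Dict String (PySem.Dict String Int)) (p : String × String) => pvVStep (d.getD p.1 PySem.Dict.empty) p.2) d x)) PySem.Dict.empty := rfl
  rw [hfold, PySem.Dict.keys_foldl_insert_key]
  show PySem.Set.update PySem.Set.empty _ = _
  rw [pvRanks]
  have : ((mappings.flatten).filter
          (fun p => !(PySem.Set.ofList ["", "no rank"] : PySem.Set String).contains p.1)).map Prod.fst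
      = ((mappings.flatten).map Prod.fst).filter
          (fun x => !(PySem.Set.ofList ["", "no rank"] : PySem.Set String).contains x) := by
    rw [List.filter_map]
    rfl
  rw [this]
  rfl

lemma pv_counts_getD (mappings : List (List (String × String))) (r : String)
    (hpre : ∀ m ∈ mappings, (m.map Prod.fst).Nodup)
    (hr : (PySem.Set.ofList ["", "no rank"] : PySem.Set String).contains r = false) :
    (pvCountsB mappings).getD r PySem.Dict.empty = PySem.Dict.counter (pvItemsFor mappings r) := by
  rw [pv_countsB_eq, pv_getD_BStep_fold]
  have hempty : (PySem.Dict.empty : PySem.Dict String (PySem.Dict String Int)).getD r PySem.Dict.empty = PySem.Dict.empty := rfl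
  rw [hempty, pv_vstep_counter]
  congr 1
  rw [List.filter_filter]
  have hcong : (mappings.flatten).filter
      (fun a => (a.1 == r) && !(PySem.Set.ofList ["", "no rank"] : PySem.Set String).contains a.1)
      = (mappings.flatten).filter (fun a => a.1 == r) := by
    apply List.filter_congr
    intro a _
    by_cases ha : a.1 = r
    · rw [ha, hr]; simp
    · simp [beq_eq_false_iff_ne.2 ha]
  rw [hcong]
  rw [List.filter_flatten, List.map_flatten, List.filter_flatten]
  rw [pvItemsFor, List.flatMap_def]
  congr 1
  rw [List.map_map, List.map_map]
  apply List.map_congr_left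
  intro m hm
  exact pv_mapping_bridge m r (hpre m hm)

lemma pv_ranksA_eq (mappings : List (List (String × String))) :
    (PySem.Set.diff (PySem.Set.ofList (mappings.flatMap (fun m => (PySem.Dict.mk m).keys)))
      (PySem.Set.ofList ["", "no rank"]) : List String) = pvRanks mappings := by
  have h1 : mappings.flatMap (fun m => (PySem.Dict.mk m).keys) = (mappings.flatten).map Prod.fst := by
    rw [List.map_flatten, List.flatMap_def]
    congr 1
  rw [h1, PySem.Set.diff, pvRanks, pv_ofList_filter]

lemma pv_allItems_eq (mappings : List (List (String × String))) (r : String) :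
    mappings.foldl (fun acc m =>
        let val := (PySem.Dict.mk m).getD r ""
        if 0 < PySem.Str.len val then acc ++ [val] else acc) []
      = pvItemsFor mappings r := by
  suffices h : ∀ acc : List String, mappings.foldl (fun acc m =>
        let val := (PySem.Dict.mk m).getD r ""
        if 0 < PySem.Str.len val then acc ++ [val] else acc) acc
      = acc ++ pvItemsFor mappings r by
    simpa using h []
  induction mappings with
  | nil => intro acc; simp [pvItemsFor]
  | cons m ms ih =>
    intro acc
    simp only [List.foldl_cons]
    show ms.foldl (fun acc m =>
        let val := (PySem.Dict.mk m).getD r ""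
        if 0 < PySem.Str.len val then acc ++ [val] else acc)
      (if 0 < PySem.Str.len (pvGet m r) then acc ++ [pvGet m r] else acc) = acc ++ pvItemsFor (m :: ms) r
    have : pvItemsFor (m :: ms) r
        = (if 0 < PySem.Str.len (pvGet m r) then [pvGet m r] else []) ++ pvItemsFor ms r := by
      simp [pvItemsFor]
    rw [this]
    by_cases h : 0 < PySem.Str.len (pvGet m r)
    · simp only [if_pos h]
      rw [ih (acc ++ [pvGet m r])]
      simp
    · simp only [if_neg h]
      rw [ih acc]
      simp

lemma pv_runConsensusOnSingleTaxa_eq (r : String) (mappings : List (List (String × String))) :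
    runConsensusOnSingleTaxa r mappings = mostCommonInList (pvItemsFor mappings r) := by
  show (if (mappings.foldl _ []).length = 0 then "" else mostCommonInList (mappings.foldl _ [])) = _
  rw [pv_allItems_eq]
  by_cases h : pvItemsFor mappings r = []
  · rw [h]
    simp
    rfl
  · rw [if_neg (by simpa using h)]

lemma pv_final_items_A (mappings : List (List (String × String))) :
    ((pvRanks mappings).foldl
      (fun (d : PySem.Dict String String) taxaRank => d.insert taxaRank (runConsensusOnSingleTaxa taxaRank mappings))
      PySem.Dict.empty).items
    = (pvRanks mappings).map (fun r => (r, runConsensusOnSingleTaxa r mappings)) := by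
  have h := pv_foldl_insert_items (key := fun x => x) (F := fun r => runConsensusOnSingleTaxa r mappings)
    (pvRanks mappings) PySem.Dict.empty (fun x _ => rfl)
    (by rw [List.map_id']; show (pvRanks mappings).Nodup; rw [pvRanks]; exact PySem.Set.nodup_ofList _)
  simpa using h

-- ===== VERDICT (by name: the statement is the Claim_ definition above) =====
theorem runConsensusForSingleSpecies_spec : Claim_equal_runConsensusForSingleSpecies := by
  intro t hdom hpre
  unfold Spec_runConsensusForSingleSpecies
  obtain ⟨name, mappings⟩ := t
  have hpre' : ∀ m ∈ mappings, (m.map Prod.fst).Nodup := hpre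
  -- A side
  have hA : runConsensusForSingleSpecies (name, mappings)
      = (name, ((PySem.Set.diff
            (PySem.Set.ofList (mappings.flatMap (fun m => (PySem.Dict.mk m).keys)))
            (PySem.Set.ofList ["", "no rank"]) : List String).foldl
          (fun (d : PySem.Dict String String) taxaRank =>
            d.insert taxaRank (runConsensusOnSingleTaxa taxaRank mappings))
          PySem.Dict.empty).items) := rfl
  rw [hA, pv_ranksA_eq, pv_final_items_A]
  -- B side
  have hB : runConsensusForSingleSpecies_alt (name, mappings)
      = (name, ((pvCountsB mappings).items.foldl
          (fun (f : PySem.Dict String String) rc => f.insert rc.1 (pvBestB rc.2))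
          PySem.Dict.empty).items) := rfl
  rw [hB]
  have hkeysdef : (pvCountsB mappings).items.map Prod.fst = (pvCountsB mappings).keys := rfl
  have hkeys : (pvCountsB mappings).items.map Prod.fst = pvRanks mappings := by
    rw [hkeysdef, pv_counts_keys]
  have hnodup : ((pvCountsB mappings).items.map Prod.fst).Nodup := by
    rw [hkeys]; exact PySem.Set.nodup_ofList _
  have hitemsB : ((pvCountsB mappings).items.foldl
          (fun (f : PySem.Dict String String) rc => f.insert rc.1 (pvBestB rc.2))
          PySem.Dict.empty).items
      = (pvCountsB mappings).items.map (fun rc => (rc.1, pvBestB rc.2)) := by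
    have h := pv_foldl_insert_items (key := Prod.fst) (F := fun rc => pvBestB rc.2)
      ((pvCountsB mappings).items) PySem.Dict.empty (fun x _ => rfl) hnodup
    simpa using h
  rw [hitemsB]
  have hmkitems : PySem.Dict.mk (pvCountsB mappings).items = pvCountsB mappings := rfl
  have hitems : (pvCountsB mappings).items
      = (pvRanks mappings).map (fun k => (k, (pvCountsB mappings).getD k PySem.Dict.empty)) := by
    conv_lhs => rw [pv_items_eq_keys_map (pvCountsB mappings).items PySem.Dict.empty hnodup]
    rw [hmkitems, hkeys]
  rw [hitems, List.map_map]
  apply congrArg (Prod.mk name)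
  apply List.map_congr_left
  intro r hr
  have hrnotskip : (PySem.Set.ofList ["", "no rank"] : PySem.Set String).contains r = false := by
    unfold pvRanks at hr
    have := (PySem.Set.mem_ofList _ r).1 hr
    have := (List.mem_filter.1 this).2
    simpa using this
  have hgetD := pv_counts_getD mappings r hpre' hrnotskip
  simp only [Function.comp]
  rw [hgetD, pv_runConsensusOnSingleTaxa_eq, pv_core]
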